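-- pv_equiv track=rewrite | github.com/agastya793/150-Question | Question 65.py | generate_fibonacci_matrix
-- ===== SOURCE A (Python) =====
-- def generate_fibonacci_matrix(rows,cols):
--
--     #generate fibonacci numbers
--     total_elements = rows * cols
--     fib = [0,1]
--
--     while len(fib) < total_elements:
--         fib.append(fib[-1] + fib[-2])
--
--         # fill the matrix
--     matrix = []
--     index = 0
--
--     for i in range(rows):
--         row = []
--         for j in range(cols):
--             row.append(fib[index])
--             index += 1
--         matrix.append(row)
--     return matrix
-- ===== SOURCE B (Python) =====
-- def generate_fibonacci_matrix(rows, cols):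
--     # Fibonacci numbers generated inline with two running scalars; no precomputed table.
--     a, b = 0, 1
--     matrix = []
--     for _ in range(rows):
--         row = []
--         for _ in range(cols):
--             row.append(a)
--             a, b = b, a + b
--         matrix.append(row)
--     return matrix
-- ===== Notes on version B (the rewrite author's own statement) =====
-- stated objective: simpler
-- what changed: B drops A's precomputed Fibonacci table and its running index, generating each entry inline from two scalar accumulators (a, b) updated as the matrix is filled.
import Mathlib
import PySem

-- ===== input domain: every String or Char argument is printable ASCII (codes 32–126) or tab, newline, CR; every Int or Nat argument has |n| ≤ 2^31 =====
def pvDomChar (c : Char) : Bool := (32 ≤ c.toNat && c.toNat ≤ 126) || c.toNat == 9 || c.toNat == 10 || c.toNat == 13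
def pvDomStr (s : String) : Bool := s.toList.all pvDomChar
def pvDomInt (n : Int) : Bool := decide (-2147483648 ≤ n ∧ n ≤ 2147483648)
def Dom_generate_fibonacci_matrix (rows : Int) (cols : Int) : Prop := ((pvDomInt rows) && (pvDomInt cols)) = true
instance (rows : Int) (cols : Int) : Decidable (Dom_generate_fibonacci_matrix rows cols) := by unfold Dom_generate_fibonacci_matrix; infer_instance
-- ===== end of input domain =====

-- B replaces A's precomputed Fibonacci table + running index by two scalar accumulators updated inline (simpler; same cost).

-- ===== PORT A =====
-- the 'while len(fib) < total_elements' loop: each pass appends one element, so starting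
-- from length 2 it runs exactly (total_elements - 2).toNat times; pyGetD default 0 is
-- never used (the list always has ≥ 2 elements / the index is always in range)
def fibWhile (fib : List Int) (fuel : Nat) : List Int :=
  match fuel with
  | 0 => fib
  | n + 1 =>
      fibWhile (fib ++ [PySem.List.pyGetD fib (-1) 0 + PySem.List.pyGetD fib (-2) 0]) n

def generate_fibonacci_matrix (rows : Int) (cols : Int) : List (List Int) :=
  let total_elements := rows * cols
  let fib := fibWhile [0, 1] (total_elements - 2).toNat
  let st := (PySem.List.pyRange 0 rows 1).foldl
    (fun (st : List (List Int) × Int) _ =>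
      let inner := (PySem.List.pyRange 0 cols 1).foldl
        (fun (rs : List Int × Int) _ => (rs.1 ++ [PySem.List.pyGetD fib rs.2 0], rs.2 + 1))
        ([], st.2)
      (st.1 ++ [inner.1], inner.2))
    ([], 0)
  st.1

-- ===== PORT B =====
-- state: (matrix, a, b) with a, b the two running Fibonacci scalars
def generate_fibonacci_matrix_alt (rows : Int) (cols : Int) : List (List Int) :=
  let st := (PySem.List.pyRange 0 rows 1).foldl
    (fun (st : List (List Int) × Int × Int) _ =>
      let inner := (PySem.List.pyRange 0 cols 1).foldl
        (fun (rs : List Int × Int × Int) _ => (rs.1 ++ [rs.2.1], rs.2.2, rs.2.1 + rs.2.2))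
        ([], st.2)
      (st.1 ++ [inner.1], inner.2))
    ([], 0, 1)
  st.1

-- ===== PRECONDITION & SPEC =====
def Spec_generate_fibonacci_matrix (rows : Int) (cols : Int) (out : List (List Int)) : Prop := out = generate_fibonacci_matrix_alt rows cols
instance (rows : Int) (cols : Int) (out : List (List Int)) : Decidable (Spec_generate_fibonacci_matrix rows cols out) := by unfold Spec_generate_fibonacci_matrix; infer_instance

-- ===== CLAIM (what is proved, stated in full; the proofs are below) =====
def Claim_equal_generate_fibonacci_matrix : Prop := ∀ (rows : Int) (cols : Int), Dom_generate_fibonacci_matrix rows cols → Spec_generate_fibonacci_matrix rows cols (generate_fibonacci_matrix rows cols)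

-- ===== LEMMAS AND PROOFS =====

def fibs : Nat → Int
  | 0 => 0
  | 1 => 1
  | n + 2 => fibs n + fibs (n + 1)

lemma fibs_map_range_succ (n c : Nat) :
    (List.range (c + 1)).map (fun j => fibs (n + j))
      = fibs n :: (List.range c).map (fun j => fibs (n + 1 + j)) := by
  rw [List.range_succ_eq_map]
  simp only [List.map_cons, List.map_map, Nat.add_zero, List.cons.injEq, true_and]
  apply List.map_congr_left
  intro j _
  simp only [Function.comp]
  congr 1
  omega

lemma fibWhile_char (n : Nat) : ∀ (m : Nat), 2 ≤ m →
    fibWhile ((List.range m).map fibs) n = (List.range (m + n)).map fibs := by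
  induction n with
  | zero => intro m _; simp [fibWhile]
  | succ k ih =>
      intro m hm
      obtain ⟨j, rfl⟩ : ∃ j, m = j + 2 := ⟨m - 2, by omega⟩
      rw [fibWhile]
      rw [PySem.List.pyGetD_neg_ofNat _ 1 0 (by omega) (by simp),
          PySem.List.pyGetD_neg_ofNat _ 2 0 (by omega) (by simp)]
      simp only [List.length_map, List.length_range, List.getElem_map, List.getElem_range]
      have h1 : fibs (j + 2 - 1) + fibs (j + 2 - 2) = fibs (j + 2) := by
        show fibs (j + 1) + fibs j = _
        rw [fibs]; ring
      rw [h1, show (List.range (j + 2)).map fibs ++ [fibs (j + 2)]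
            = (List.range (j + 3)).map fibs by simp [List.range_succ],
          ih (j + 3) (by omega)]
      congr 2
      omega

lemma innerA (N : Nat) (l : List Int) : ∀ (row : List Int) (n : Nat), n + l.length ≤ N →
    l.foldl (fun (rs : List Int × Int) _ =>
        (rs.1 ++ [PySem.List.pyGetD ((List.range N).map fibs) rs.2 0], rs.2 + 1))
        (row, (n : Int))
      = (row ++ (List.range l.length).map (fun j => fibs (n + j)), ((n + l.length : Nat) : Int)) := by
  induction l with
  | nil => intro row n _; simp
  | cons x t ih =>
      intro row n h
      simp only [List.length_cons] at h ⊢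
      have hn : n < N := by omega
      simp only [List.foldl_cons, PySem.List.pyGetD_natCast]
      have hget : ((List.range N).map fibs).getD n 0 = fibs n := by
        rw [List.getD_eq_getElem?_getD]
        simp [List.getElem?_map, List.getElem?_range hn]
      rw [hget, show ((n : Int) + 1) = ((n + 1 : Nat) : Int) by push_cast; ring,
          ih (row ++ [fibs n]) (n + 1) (by omega)]
      rw [fibs_map_range_succ]
      congr 1
      · simp
      · congr 1
        omega

lemma innerB (l : List Int) : ∀ (row : List Int) (n : Nat),
    l.foldl (fun (rs : List Int × Int × Int) _ => (rs.1 ++ [rs.2.1], rs.2.2, rs.2.1 + rs.2.2))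
        (row, fibs n, fibs (n + 1))
      = (row ++ (List.range l.length).map (fun j => fibs (n + j)),
         fibs (n + l.length), fibs (n + l.length + 1)) := by
  induction l with
  | nil => intro row n; simp
  | cons x t ih =>
      intro row n
      simp only [List.length_cons, List.foldl_cons]
      rw [show fibs n + fibs (n + 1) = fibs ((n + 1) + 1) by rw [fibs],
          ih (row ++ [fibs n]) (n + 1)]
      rw [fibs_map_range_succ,
          show n + 1 + t.length = n + (t.length + 1) from by omega]
      simp

lemma outer_eq (N : Nat) (cols : Int) (L : List Int) :
    ∀ (mat : List (List Int)) (n : Nat),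
    n + L.length * (PySem.List.pyRange 0 cols 1).length ≤ N →
    (L.foldl (fun (st : List (List Int) × Int) _ =>
        let inner := (PySem.List.pyRange 0 cols 1).foldl
          (fun (rs : List Int × Int) _ =>
            (rs.1 ++ [PySem.List.pyGetD ((List.range N).map fibs) rs.2 0], rs.2 + 1))
          ([], st.2)
        (st.1 ++ [inner.1], inner.2)) (mat, (n : Int))).1
    = (L.foldl (fun (st : List (List Int) × Int × Int) _ =>
        let inner := (PySem.List.pyRange 0 cols 1).foldl
          (fun (rs : List Int × Int × Int) _ => (rs.1 ++ [rs.2.1], rs.2.2, rs.2.1 + rs.2.2))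
          ([], st.2)
        (st.1 ++ [inner.1], inner.2)) (mat, fibs n, fibs (n + 1))).1 := by
  induction L with
  | nil => intro mat n _; simp
  | cons x t ih =>
      intro mat n h
      simp only [List.length_cons] at h
      have hc : (t.length + 1) * (PySem.List.pyRange 0 cols 1).length
          = t.length * (PySem.List.pyRange 0 cols 1).length
            + (PySem.List.pyRange 0 cols 1).length := by ring
      simp only [List.foldl_cons]
      rw [innerA N _ [] n (by omega), innerB _ [] n]
      simpa using ih (mat ++ [(List.range (PySem.List.pyRange 0 cols 1).length).map
          (fun j => fibs (n + j))]) (n + (PySem.List.pyRange 0 cols 1).length)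
          (by omega)

lemma size_bound (rows cols : Int) :
    Int.toNat rows * Int.toNat cols ≤ 2 + (rows * cols - 2).toNat := by
  by_cases h : rows ≤ 0
  · simp [Int.toNat_of_nonpos h]
  by_cases h2 : cols ≤ 0
  · simp [Int.toNat_of_nonpos h2]
  · have hrw : rows * cols = ((rows.toNat * cols.toNat : Nat) : Int) := by
      push_cast
      rw [Int.toNat_of_nonneg (by omega), Int.toNat_of_nonneg (by omega)]
    rw [hrw]
    omega

-- ===== VERDICT (by name: the statement is the Claim_ definition above) =====
theorem generate_fibonacci_matrix_spec : Claim_equal_generate_fibonacci_matrix := by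
  intro rows cols _
  show generate_fibonacci_matrix rows cols = generate_fibonacci_matrix_alt rows cols
  have hfib : fibWhile [0, 1] (rows * cols - 2).toNat
      = (List.range (2 + (rows * cols - 2).toNat)).map fibs := by
    rw [show ([0, 1] : List Int) = (List.range 2).map fibs by rfl]
    exact fibWhile_char _ 2 (by omega)
  simp only [generate_fibonacci_matrix, generate_fibonacci_matrix_alt, hfib]
  have hb : (PySem.List.pyRange 0 rows 1).length * (PySem.List.pyRange 0 cols 1).length
      ≤ 2 + (rows * cols - 2).toNat := by
    rw [PySem.List.length_pyRange_one, PySem.List.length_pyRange_one]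
    simpa using size_bound rows cols
  have := outer_eq (2 + (rows * cols - 2).toNat) cols (PySem.List.pyRange 0 rows 1) [] 0
    (by simpa using hb)
  simpa [fibs] using this
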